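-- pv_equiv track=rewrite | github.com/manoj2601/COL764-Information-Retrieval-And-Web-Search | Assignment 1/2018CS50411/helper.py | changeBinaryc2
-- ===== SOURCE A (Python) =====
-- def lsb(a, b):
-- 	bin = "{0:b}".format(a)
-- 	return bin[-b:]
--
-- def encodec2(num):
-- 	if(num==1):
-- 		return "0"
-- 	binString = "{0:b}".format(num)
-- 	lx = len(binString)
-- 	llx = len("{0:b}".format(lx))
-- 	ullx = ""
-- 	for i in range(0, llx-1):
-- 		ullx += '1'
-- 	ullx += '0'
-- 	rett = ""
-- 	rett += ullx
-- 	rett += lsb(lx, llx-1)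
-- 	rett += lsb(num, lx-1)
-- 	return rett
--
-- def changeBinaryc2(val):
-- 	newlist = []
-- 	newlist.append(1+val[0])
-- 	for i in range(0, len(val)-1):
-- 		newlist.append(val[i+1]-val[i])
--
-- 	ret = []
-- 	prev = ""
-- 	for i in range(0, len(newlist)):
-- 		num = newlist[i]
--
-- 		rett = prev
-- 		rett += encodec2(num)
-- 		j=0
-- 		while(j+8 < len(rett)):
-- 			ret.append(rett[j:j+8])
-- 			j = j+8
-- 		prev = rett[j:]
-- 	if(len(prev) != 0):
-- 		for i in range(0, 8-len(prev)):
-- 			prev += '1'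
-- 		ret.append(prev)
-- 	return ret
-- ===== SOURCE B (Python) =====
-- def lsb(a, b):
-- 	bin = "{0:b}".format(a)
-- 	return bin[-b:]
--
-- def encodec2(num):
-- 	if(num==1):
-- 		return "0"
-- 	binString = "{0:b}".format(num)
-- 	lx = len(binString)
-- 	llx = len("{0:b}".format(lx))
-- 	ullx = ""
-- 	for i in range(0, llx-1):
-- 		ullx += '1'
-- 	ullx += '0'
-- 	rett = ""
-- 	rett += ullx
-- 	rett += lsb(lx, llx-1)
-- 	rett += lsb(num, lx-1)
-- 	return rett
--
-- def changeBinaryc2(val):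
-- 	# build-then-chunk: concatenate all codes first, pad to a byte boundary, slice into 8s
-- 	newlist = [1 + val[0]] + [b - a for a, b in zip(val, val[1:])]
-- 	s = "".join(encodec2(n) for n in newlist)
-- 	s += '1' * (-len(s) % 8)
-- 	return [s[i:i+8] for i in range(0, len(s), 8)]
-- ===== Notes on version B (the rewrite author's own statement) =====
-- stated objective: simpler
-- what changed: Replaces A's interleaved per-number flush loop threading a `prev` carry (inner while flushing 8-char slices after each code) by a clean two-phase build-then-chunk: concatenate all codes into one bit string, pad it to a byte boundary with '1's, and slice it into consecutive 8-char chunks.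
import Mathlib
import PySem

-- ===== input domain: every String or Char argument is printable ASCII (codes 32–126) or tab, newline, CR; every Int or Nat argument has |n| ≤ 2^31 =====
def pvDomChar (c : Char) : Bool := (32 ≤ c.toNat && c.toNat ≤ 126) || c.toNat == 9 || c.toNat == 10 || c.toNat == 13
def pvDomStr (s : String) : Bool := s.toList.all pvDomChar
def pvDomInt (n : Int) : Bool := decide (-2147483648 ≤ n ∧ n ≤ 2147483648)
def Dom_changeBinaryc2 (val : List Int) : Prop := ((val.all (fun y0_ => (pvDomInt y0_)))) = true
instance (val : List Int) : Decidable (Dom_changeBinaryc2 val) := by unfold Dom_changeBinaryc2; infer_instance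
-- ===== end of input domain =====

-- B replaces A's interleaved per-number flush loop (threaded `prev` carry) by build-then-chunk:
-- concatenate all codes, pad to a byte boundary with '1's, slice into 8-char chunks (objective: simpler).

-- ===== PORT A =====
-- Python strings are ported as List Char (PySem.Chars side); "{0:b}".format(a) is PySem.Int.toBinChars.
def lsbA (a b : Int) : List Char :=
  PySem.List.slice (PySem.Int.toBinChars a) (some (-b)) none     -- bin[-b:]

def encodec2A (num : Int) : List Char :=
  if num == 1 then ['0']
  else
    let binString := PySem.Int.toBinChars num
    let lx : Int := binString.length
    let llx : Int := (PySem.Int.toBinChars lx).length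
    -- the for-loop appending '1' (llx-1) times, then '0' (range clamps negatives to empty, as toNat does)
    let ullx := List.replicate (llx - 1).toNat '1' ++ ['0']
    ullx ++ lsbA lx (llx - 1) ++ lsbA num (lx - 1)

-- A's inner 'while (j+8 < len(rett))' flush loop, expressed on the remaining suffix
-- (rett[j:j+8] / rett[j:] on the suffix starting at j are take 8 / drop 8 — indices are in range).
def flushA (ret : List String) (rett : List Char) : List String × List Char :=
  if h : 8 < rett.length then
    flushA (ret ++ [String.ofList (rett.take 8)]) (rett.drop 8)
  else (ret, rett)
termination_by rett.length
decreasing_by simp; omega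

def changeBinaryc2 (val : List Int) : List String :=
  match PySem.List.pyGet? val 0 with
  | none => []            -- the first-element access raises IndexError in Python on the empty list; excluded by Pre_
  | some v0 =>
    let newlist : List Int :=
      (PySem.List.pyRange 0 ((val.length : Int) - 1) 1).foldl
        (fun acc i => acc ++ [PySem.List.pyGetD val (i + 1) 0 - PySem.List.pyGetD val i 0])
        [1 + v0]
    let st := newlist.foldl
      (fun (st : List String × List Char) num => flushA st.1 (st.2 ++ encodec2A num)) ([], [])
    if st.2.length ≠ 0 then
      st.1 ++ [String.ofList (st.2 ++ List.replicate (8 - st.2.length) '1')]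
    else st.1

-- ===== PORT B =====
-- Source B reuses the same helpers lsb/encodec2, so their ports are shared.
-- [s[i:i+8] for i in range(0, len(s), 8)]
def chunk8B (s : List Char) : List String :=
  if h : s = [] then [] else String.ofList (s.take 8) :: chunk8B (s.drop 8)
termination_by s.length
decreasing_by cases s with
  | nil => exact absurd rfl h
  | cons a t => simp

def changeBinaryc2_alt (val : List Int) : List String :=
  match val with
  | [] => []              -- the first-element access raises IndexError in Python on the empty list; excluded by Pre_
  | v0 :: rest =>
    let newlist : List Int := (1 + v0) :: List.zipWith (fun a b => b - a) val rest
    let s := (newlist.map encodec2A).flatten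
    let s := s ++ List.replicate (PySem.Int.mod (-(s.length : Int)) 8).toNat '1'
    chunk8B s

-- ===== PRECONDITION & SPEC =====
-- Pre_ excludes only the empty list, on which the Python A (and B) raise IndexError at the initial first-element access.
def Pre_changeBinaryc2 (val : List Int) : Prop := val ≠ []
instance (val : List Int) : Decidable (Pre_changeBinaryc2 val) := by unfold Pre_changeBinaryc2; infer_instance
def pvWitness_changeBinaryc2 : List Int := [3, 5, 2]
def Spec_changeBinaryc2 (val : List Int) (out : List String) : Prop := out = changeBinaryc2_alt val
instance (val : List Int) (out : List String) : Decidable (Spec_changeBinaryc2 val out) := by unfold Spec_changeBinaryc2; infer_instance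

-- ===== CLAIM (what is proved, stated in full; the proofs are below) =====
def Claim_equal_changeBinaryc2 : Prop := ∀ (val : List Int), Dom_changeBinaryc2 val → Pre_changeBinaryc2 val → Spec_changeBinaryc2 val (changeBinaryc2 val)

-- ===== LEMMAS AND PROOFS =====

-- Closed characterisation of A's flush loop: the full 8-chunks it emits, and the carry it leaves.
def chunksS (s : List Char) : List String :=
  if h : 8 < s.length then String.ofList (s.take 8) :: chunksS (s.drop 8) else []
termination_by s.length
decreasing_by simp; omega

def remS (s : List Char) : List Char :=
  if h : 8 < s.length then remS (s.drop 8) else s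
termination_by s.length
decreasing_by simp; omega

theorem chunksS_pos (s : List Char) (h : 8 < s.length) :
    chunksS s = String.ofList (s.take 8) :: chunksS (s.drop 8) := by
  rw [chunksS]; rw [dif_pos h]

theorem chunksS_neg (s : List Char) (h : ¬ 8 < s.length) : chunksS s = [] := by
  rw [chunksS]; rw [dif_neg h]

theorem remS_pos (s : List Char) (h : 8 < s.length) : remS s = remS (s.drop 8) := by
  rw [remS]; rw [dif_pos h]

theorem remS_neg (s : List Char) (h : ¬ 8 < s.length) : remS s = s := by
  rw [remS]; rw [dif_neg h]

theorem chunk8B_ne (s : List Char) (h : s ≠ []) :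
    chunk8B s = String.ofList (s.take 8) :: chunk8B (s.drop 8) := by
  rw [chunk8B]; rw [dif_neg h]

theorem flushA_eq : ∀ n (s : List Char), s.length ≤ n → ∀ ret, flushA ret s = (ret ++ chunksS s, remS s) := by
  intro n
  induction n with
  | zero =>
    intro s hs ret
    have h : ¬ 8 < s.length := by omega
    rw [flushA, chunksS_neg s h, remS_neg s h]
    simp [h]
  | succ n ih =>
    intro s hs ret
    rw [flushA]
    by_cases h : 8 < s.length
    · rw [dif_pos h, ih (s.drop 8) (by simp; omega)]
      rw [chunksS_pos s h, remS_pos s h]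
      simp
    · rw [dif_neg h, chunksS_neg s h, remS_neg s h]
      simp

theorem remS_len_le (s : List Char) : (remS s).length ≤ 8 := by
  fun_induction remS s with
  | case1 s h ih => exact ih
  | case2 s h => omega

theorem remS_ne_nil (s : List Char) (hs : s ≠ []) : remS s ≠ [] := by
  fun_induction remS s with
  | case1 s h ih =>
    apply ih
    have : (s.drop 8).length = s.length - 8 := by simp
    intro hc; rw [hc] at this; simp at this; omega
  | case2 s h => exact hs

theorem stream_eq : ∀ n (s : List Char), s.length ≤ n → ∀ t,
    chunksS (s ++ t) = chunksS s ++ chunksS (remS s ++ t) ∧ remS (s ++ t) = remS (remS s ++ t) := by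
  intro n
  induction n with
  | zero =>
    intro s hs t
    have h : ¬ 8 < s.length := by omega
    rw [chunksS_neg s h, remS_neg s h]
    simp
  | succ n ih =>
    intro s hs t
    by_cases h : 8 < s.length
    · have hst : 8 < (s ++ t).length := by simp; omega
      have htake : (s ++ t).take 8 = s.take 8 := List.take_append_of_le_length (by omega)
      have hdrop : (s ++ t).drop 8 = s.drop 8 ++ t := List.drop_append_of_le_length (by omega)
      have ihs := ih (s.drop 8) (by simp; omega) t
      constructor
      · rw [chunksS_pos _ hst, htake, hdrop, ihs.1, chunksS_pos s h, remS_pos s h]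
        simp
      · rw [remS_pos _ hst, hdrop, ihs.2, remS_pos s h]
    · rw [chunksS_neg s h, remS_neg s h]
      simp

theorem loop_eq : ∀ (codes : List (List Char)) (ret : List String) (prev : List Char), prev.length ≤ 8 →
    codes.foldl (fun (st : List String × List Char) c => flushA st.1 (st.2 ++ c)) (ret, prev)
      = (ret ++ chunksS (prev ++ codes.flatten), remS (prev ++ codes.flatten)) := by
  intro codes
  induction codes with
  | nil =>
    intro ret prev hp
    have h : ¬ 8 < prev.length := by omega
    rw [List.foldl_nil, List.flatten_nil, List.append_nil, chunksS_neg prev h, remS_neg prev h]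
    simp
  | cons c cs ih =>
    intro ret prev hp
    have hstep : flushA ret (prev ++ c) = (ret ++ chunksS (prev ++ c), remS (prev ++ c)) :=
      flushA_eq (prev ++ c).length _ le_rfl ret
    have hstream := stream_eq (prev ++ c).length (prev ++ c) le_rfl cs.flatten
    simp only [List.foldl_cons, hstep]
    rw [ih _ _ (remS_len_le (prev ++ c))]
    simp only [List.flatten_cons, ← List.append_assoc]
    rw [hstream.1, hstream.2]
    simp [List.append_assoc]

theorem pad_count (n : Nat) : ((PySem.Int.mod (-(n : Int)) 8)).toNat = (8 - n % 8) % 8 := by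
  rw [PySem.Int.mod_eq_emod_of_pos (by omega)]
  omega

theorem chunk_eq : ∀ m (s : List Char), s.length ≤ m → s ≠ [] →
    chunk8B (s ++ List.replicate ((8 - s.length % 8) % 8) '1')
      = chunksS s ++ [String.ofList (remS s ++ List.replicate (8 - (remS s).length) '1')] := by
  intro m
  induction m with
  | zero =>
    intro s hs hne
    cases s with
    | nil => exact absurd rfl hne
    | cons a t => simp at hs
  | succ m ih =>
    intro s hs hne
    by_cases h : 8 < s.length
    · have hpad : (8 - s.length % 8) % 8 = (8 - (s.drop 8).length % 8) % 8 := by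
        have : (s.drop 8).length = s.length - 8 := by simp
        omega
      rw [chunk8B_ne _ (by simp [hne])]
      have htake : (s ++ List.replicate ((8 - s.length % 8) % 8) '1').take 8 = s.take 8 :=
        List.take_append_of_le_length (by omega)
      have hdrop : (s ++ List.replicate ((8 - s.length % 8) % 8) '1').drop 8
          = s.drop 8 ++ List.replicate ((8 - (s.drop 8).length % 8) % 8) '1' := by
        rw [List.drop_append_of_le_length (by omega), hpad]
      rw [htake, hdrop, ih (s.drop 8) (by simp; omega) (by intro hc; have := congrArg List.length hc; simp at this; omega)]
      rw [chunksS_pos s h, remS_pos s h]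
      simp
    · have hlen : 1 ≤ s.length := by
        cases s with
        | nil => exact absurd rfl hne
        | cons a t => simp
      have hrem : remS s = s := remS_neg s h
      have hch : chunksS s = [] := chunksS_neg s h
      have hlen8 : (s ++ List.replicate ((8 - s.length % 8) % 8) '1').length = 8 := by
        simp; omega
      rw [chunk8B_ne _ (by intro hc; rw [hc] at hlen8; simp at hlen8)]
      rw [List.take_of_length_le (by omega), List.drop_of_length_le (by omega)]
      rw [chunk8B, dif_pos rfl, hch, hrem]
      have hc : (8 - s.length % 8) % 8 = 8 - s.length := by omega
      simp [hc]

theorem encodec2A_ne_nil (num : Int) : encodec2A num ≠ [] := by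
  unfold encodec2A
  by_cases h : num == 1
  · rw [if_pos h]
    exact List.cons_ne_nil _ _
  · rw [if_neg h]
    intro hc
    rcases List.append_eq_nil_iff.mp hc with ⟨h1, _⟩
    rcases List.append_eq_nil_iff.mp h1 with ⟨h2, _⟩
    exact List.cons_ne_nil _ _ (List.append_eq_nil_iff.mp h2).2

theorem newlist_map (l : List Int) :
    (List.range (l.length - 1)).map (fun k => l.getD (k + 1) 0 - l.getD k 0)
      = List.zipWith (fun a b => b - a) l l.tail := by
  induction l with
  | nil => simp
  | cons x t ih =>
    cases t with
    | nil => simp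
    | cons y u =>
      have hlen : (x :: y :: u).length - 1 = ((y :: u).length - 1) + 1 := by simp
      rw [hlen, List.range_succ_eq_map]
      simp only [List.map_cons, List.map_map]
      have : ((fun k => (x :: y :: u).getD (k + 1) 0 - (x :: y :: u).getD k 0) ∘ Nat.succ)
          = fun k => (y :: u).getD (k + 1) 0 - (y :: u).getD k 0 := by
        funext k; simp [List.getD]
      rw [this, ih]
      simp

theorem newlist_eq (v0 : Int) (rest : List Int) :
    (PySem.List.pyRange 0 (((v0 :: rest).length : Int) - 1) 1).foldl
        (fun acc i => acc ++ [PySem.List.pyGetD (v0 :: rest) (i + 1) 0 - PySem.List.pyGetD (v0 :: rest) i 0])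
        [1 + v0]
      = (1 + v0) :: List.zipWith (fun a b => b - a) (v0 :: rest) rest := by
  rw [PySem.List.foldl_append_singleton_eq_map]
  have hlen : ((v0 :: rest).length : Int) - 1 = ((rest.length : Nat) : Int) := by simp
  rw [hlen, PySem.List.pyRange_zero_natCast, List.map_map]
  have : ((fun i => PySem.List.pyGetD (v0 :: rest) (i + 1) 0 - PySem.List.pyGetD (v0 :: rest) i 0) ∘ (fun k : Nat => (k : Int)))
      = fun k : Nat => (v0 :: rest).getD (k + 1) 0 - (v0 :: rest).getD k 0 := by
    funext k
    have h1 : ((k : Int) + 1) = ((k + 1 : Nat) : Int) := by push_cast; ring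
    rw [Function.comp_apply, h1, PySem.List.pyGetD_natCast, PySem.List.pyGetD_natCast]
  rw [this]
  have hr : rest.length = (v0 :: rest).length - 1 := by simp
  rw [hr, newlist_map]
  rfl

-- ===== VERDICT (by name: the statement is the Claim_ definition above) =====
theorem changeBinaryc2_spec : Claim_equal_changeBinaryc2 := by
  intro val _hdom hpre
  unfold Spec_changeBinaryc2
  cases val with
  | nil => exact absurd rfl hpre
  | cons v0 rest =>
    unfold changeBinaryc2 changeBinaryc2_alt
    have hget : PySem.List.pyGet? (v0 :: rest) 0 = some v0 := by
      simp [PySem.List.pyGet?, PySem.List.pyIdx?]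
    rw [hget]
    dsimp only
    rw [newlist_eq]
    set nl : List Int := (1 + v0) :: List.zipWith (fun a b => b - a) (v0 :: rest) rest with hnl
    have hmap : nl.foldl (fun (st : List String × List Char) num => flushA st.1 (st.2 ++ encodec2A num)) ([], [])
        = (nl.map encodec2A).foldl (fun (st : List String × List Char) c => flushA st.1 (st.2 ++ c)) ([], []) := by
      rw [List.foldl_map]
    set S : List Char := (nl.map encodec2A).flatten with hS
    have hSne : S ≠ [] := by
      rw [hS, hnl]
      simp only [List.map_cons, List.flatten_cons]
      intro hc
      exact encodec2A_ne_nil (1 + v0) (List.append_eq_nil_iff.mp hc).1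
    have hloop := loop_eq (nl.map encodec2A) [] [] (by simp)
    rw [hmap, hloop]
    simp only [List.nil_append, ← hS]
    have hrne : remS S ≠ [] := remS_ne_nil S hSne
    have hrlen : (remS S).length ≠ 0 := by
      intro hc; exact hrne (List.eq_nil_of_length_eq_zero hc)
    rw [if_pos hrlen]
    rw [pad_count S.length]
    exact (chunk_eq S.length S le_rfl hSne).symm
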